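-- pv_equiv track=rewrite | github.com/PaddlePaddle/Paddle | tools/sampcd_processor.py | check_indent
-- ===== SOURCE A (Python) =====
-- def check_indent(cdline):
--     """
--     to check the indent of a given code line
--
--     to get the number of starting blank chars,
--     e.t. blankspaces and \t
--
--     \t will be interpreted as 4 single blankspaces,
--     e.t. '\t'='    '
--
--     Args:
--         cdline(str) : a single line of code from the source file
--
--     Returns:
--         int : the indent of the number of interpreted
--              blankspaces
--     """
--     indent = 0
--     for c in cdline:
--         if c == '\t':
--             indent += 4
--         elif c == ' ':
--             indent += 1
--         if c != ' ' and c != '\t':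
--             break
--     return indent
-- ===== SOURCE B (Python) =====
-- def check_indent(cdline):
--     prefix = cdline[:len(cdline) - len(cdline.lstrip(' \t'))]
--     return prefix.count(' ') + 4 * prefix.count('\t')
-- ===== Notes on version B (the rewrite author's own statement) =====
-- stated objective: simpler
-- what changed: Replaced the early-breaking accumulator loop with a two-phase extract-then-tally: take the leading ' '/'\t' prefix via lstrip and return count(' ') + 4*count('\t').
import Mathlib
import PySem

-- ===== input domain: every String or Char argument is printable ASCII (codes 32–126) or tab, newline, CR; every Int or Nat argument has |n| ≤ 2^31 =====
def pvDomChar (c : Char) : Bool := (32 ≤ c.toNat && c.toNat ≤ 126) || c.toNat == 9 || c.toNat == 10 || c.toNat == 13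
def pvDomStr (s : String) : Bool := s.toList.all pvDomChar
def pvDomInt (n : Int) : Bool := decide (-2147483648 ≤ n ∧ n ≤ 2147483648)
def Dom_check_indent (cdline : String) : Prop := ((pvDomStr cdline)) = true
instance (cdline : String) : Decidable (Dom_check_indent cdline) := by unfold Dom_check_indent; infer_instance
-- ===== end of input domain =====

-- B replaces A's early-breaking accumulator loop by extract-the-' '/'\t'-prefix then tally counts (objective: simpler).

-- ===== PORT A =====
-- the 'for c in cdline' loop with its break, as structural recursion over the characters
def check_indent_loop : List Char → Int → Int
  | [], indent => indent
  | c :: rest, indent =>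
    let indent := if c == '\t' then indent + 4 else if c == ' ' then indent + 1 else indent
    if c ≠ ' ' ∧ c ≠ '\t' then indent else check_indent_loop rest indent

def check_indent (cdline : String) : Int := check_indent_loop cdline.toList 0

-- ===== PORT B =====
def check_indent_alt (cdline : String) : Int :=
  -- cdline[:len(cdline) - len(cdline.lstrip(' \t'))] is exactly the longest leading run of ' '/'\t'
  let pre := cdline.toList.takeWhile (fun c => c == ' ' || c == '\t')
  (PySem.List.count pre ' ' : Int) + 4 * (PySem.List.count pre '\t' : Int)

-- ===== PRECONDITION & SPEC =====
def Spec_check_indent (cdline : String) (out : Int) : Prop := out = check_indent_alt cdline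
instance (cdline : String) (out : Int) : Decidable (Spec_check_indent cdline out) := by unfold Spec_check_indent; infer_instance

-- ===== CLAIM (what is proved, stated in full; the proofs are below) =====
def Claim_equal_check_indent : Prop := ∀ (cdline : String), Dom_check_indent cdline → Spec_check_indent cdline (check_indent cdline)

-- ===== LEMMAS AND PROOFS =====
lemma check_indent_loop_eq (l : List Char) (acc : Int) :
    check_indent_loop l acc =
      acc + ((PySem.List.count (l.takeWhile (fun c => c == ' ' || c == '\t')) ' ' : Int)
        + 4 * (PySem.List.count (l.takeWhile (fun c => c == ' ' || c == '\t')) '\t' : Int)) := by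
  induction l generalizing acc with
  | nil => simp [check_indent_loop, PySem.List.count]
  | cons c rest ih =>
    by_cases ht : c = '\t'
    · subst ht
      simp [check_indent_loop, ih, PySem.List.count]
      ring
    · by_cases hs : c = ' '
      · subst hs
        simp [check_indent_loop, ih, PySem.List.count]
        ring
      · have hb : (c == ' ' || c == '\t') = false := by simp [ht, hs]
        simp [check_indent_loop, ht, hs, PySem.List.count, List.takeWhile, hb]

-- ===== VERDICT (by name: the statement is the Claim_ definition above) =====
theorem check_indent_spec : Claim_equal_check_indent := by
  intro cdline _
  unfold Spec_check_indent check_indent check_indent_alt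
  simp [check_indent_loop_eq]
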